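-- pv_equiv track=rewrite | github.com/platiagro/tasks | tasks/nlp-pdf-info-extractor/preprocess.py | split_by_section
-- ===== SOURCE A (Python) =====
-- def split_by_section(pages: list, sections: list):
--     sections_data = {}
--     for s in sections:
--         sections_data[s] = []
--     last_section = sections[0]
--     for page in pages:
--         p = page.replace('\n', '').strip()
--         found = False
--         for s in sections:
--             if s in p:
--                 sections_data[s].append(page)
--                 last_section = s
--                 found = True
--         if not found:
--             sections_data[last_section].append(page)
--     return sections_data
-- ===== SOURCE B (Python) =====
-- def split_by_section(pages: list, sections: list):
--     # Phase 1: resolve each page to the list of sections it belongs to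
--     # (its matching sections, or the carried-over last section).
--     assigns = []
--     last = sections[0]
--     for page in pages:
--         p = page.replace('\n', '').strip()
--         hits = [s for s in sections if s in p]
--         if hits:
--             assigns.append((page, hits))
--             last = hits[-1]
--         else:
--             assigns.append((page, [last]))
--     # Phase 2: group section-major, preserving first-occurrence key order.
--     return {s: [pg for pg, hs in assigns for h in hs if h == s]
--             for s in dict.fromkeys(sections)}
-- ===== Notes on version B (the rewrite author's own statement) =====
-- stated objective: alternative
-- what changed: A builds the result in one page-major pass that mutates per-section dict buckets under a found-flag inner scan; B first resolves every page to its list of owning sections (phase 1, carrying the last matched section), then groups section-major with one comprehension per distinct section (phase 2).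
import Mathlib
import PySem

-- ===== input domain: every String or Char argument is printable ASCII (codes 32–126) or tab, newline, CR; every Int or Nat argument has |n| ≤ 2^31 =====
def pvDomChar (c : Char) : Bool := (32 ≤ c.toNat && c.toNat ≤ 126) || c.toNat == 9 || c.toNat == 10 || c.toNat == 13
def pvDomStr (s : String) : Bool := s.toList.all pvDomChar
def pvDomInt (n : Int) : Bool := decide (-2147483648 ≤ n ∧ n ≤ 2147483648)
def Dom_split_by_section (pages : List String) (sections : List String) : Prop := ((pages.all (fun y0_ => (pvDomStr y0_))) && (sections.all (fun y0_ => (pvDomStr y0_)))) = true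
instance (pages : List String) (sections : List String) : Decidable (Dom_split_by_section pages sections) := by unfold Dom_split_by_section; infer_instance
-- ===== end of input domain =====

-- B replaces A's page-major dict mutation (with a found-flag inner scan) by two phases:
-- resolve each page to its section list, then group section-major; objective: alternative decomposition.

-- ===== PORT A =====
-- one iteration of A's `for page in pages` loop, state = (sections_data, last_section)
def pvAStep (sections : List String) (st : PySem.Dict String (List String) × String)
    (page : String) : PySem.Dict String (List String) × String :=
  let p := PySem.Str.strip (PySem.Str.replace page "\n" "")
  let inner := sections.foldl
    (fun (st2 : PySem.Dict String (List String) × String × Bool) s =>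
      if PySem.Str.isIn s p then (st2.1.modify s [] (· ++ [page]), s, true) else st2)
    (st.1, st.2, false)
  if inner.2.2 then (inner.1, inner.2.1)
  else (inner.1.modify inner.2.1 [] (· ++ [page]), inner.2.1)

def split_by_section (pages : List String) (sections : List String) : List (String × List String) :=
  let d0 := sections.foldl (fun d s => d.insert s ([] : List String)) PySem.Dict.empty
  -- sections[0]: Pre_ requires sections ≠ [], where headD "" is exact
  let st := pages.foldl (pvAStep sections) (d0, sections.headD "")
  st.1.items

-- ===== PORT B =====
def pvNorm (page : String) : String := PySem.Str.strip (PySem.Str.replace page "\n" "")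

-- one iteration of B's phase-1 loop, state = (assigns, last)
def pvBStep (sections : List String) (st : List (String × List String) × String)
    (page : String) : List (String × List String) × String :=
  let hits := sections.filter (fun s => PySem.Str.isIn s (pvNorm page))
  if hits.isEmpty then (st.1 ++ [(page, [st.2])], st.2)
  else (st.1 ++ [(page, hits)], hits.getLastD st.2)

-- [pg for pg, hs in assigns for h in hs if h == s]
def pvGroup (assigns : List (String × List String)) (s : String) : List String :=
  assigns.flatMap (fun pr => (pr.2.filter (fun h => h == s)).map (fun _ => pr.1))

def split_by_section_alt (pages : List String) (sections : List String) :
    List (String × List String) :=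
  let assigns := (pages.foldl (pvBStep sections) ([], sections.headD "")).1
  (PySem.List.dedup sections).map (fun s => (s, pvGroup assigns s))

-- ===== PRECONDITION & SPEC =====
-- Python A evaluates sections[0] unconditionally: it raises IndexError iff sections == []
def Pre_split_by_section (pages : List String) (sections : List String) : Prop := sections ≠ []
instance (pages : List String) (sections : List String) : Decidable (Pre_split_by_section pages sections) := by unfold Pre_split_by_section; infer_instance
def pvWitness_split_by_section : List String × List String := (["intro text", "more"], ["intro", "body"])

def Spec_split_by_section (pages : List String) (sections : List String) (out : List (String × List String)) : Prop := out = split_by_section_alt pages sections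
instance (pages : List String) (sections : List String) (out : List (String × List String)) : Decidable (Spec_split_by_section pages sections out) := by unfold Spec_split_by_section; infer_instance

-- ===== CLAIM (what is proved, stated in full; the proofs are below) =====
def Claim_equal_split_by_section : Prop := ∀ (pages : List String) (sections : List String), Dom_split_by_section pages sections → Pre_split_by_section pages sections → Spec_split_by_section pages sections (split_by_section pages sections)

-- ===== LEMMAS AND PROOFS =====

-- A's inner section scan = a fold of appends over the filtered hits, plus last/found bookkeeping
theorem pv_inner_char (page p : String) : ∀ (sections : List String)
    (d : PySem.Dict String (List String)) (last : String) (found : Bool),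
    sections.foldl
      (fun (st2 : PySem.Dict String (List String) × String × Bool) s =>
        if PySem.Str.isIn s p then (st2.1.modify s [] (· ++ [page]), s, true) else st2)
      (d, last, found)
    = ((sections.filter (fun s => PySem.Str.isIn s p)).foldl
         (fun d s => d.modify s [] (· ++ [page])) d,
       (sections.filter (fun s => PySem.Str.isIn s p)).getLastD last,
       found || !(sections.filter (fun s => PySem.Str.isIn s p)).isEmpty) := by
  intro sections
  induction sections with
  | nil => intro d last found; simp
  | cons a t ih =>
    intro d last found
    rw [List.foldl_cons]
    by_cases h : PySem.Str.isIn a p = true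
    · rw [if_pos h, ih]
      have h' : PySem.Chars.isIn a.toList p.toList = true := by simpa using h
      rw [show List.filter (fun s => PySem.Str.isIn s p) (a :: t)
            = a :: List.filter (fun s => PySem.Str.isIn s p) t from by
        simp [h']]
      refine congrArg₂ Prod.mk rfl (congrArg₂ Prod.mk ?_ ?_)
      · rw [List.getLastD_cons]
      · simp
    · rw [if_neg h, ih]
      have h' : PySem.Chars.isIn a.toList p.toList = false := by
        simpa using h
      rw [show List.filter (fun s => PySem.Str.isIn s p) (a :: t)
            = List.filter (fun s => PySem.Str.isIn s p) t from by
        simp [h']]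

-- get? on a dict of the mapped form
theorem pv_get?_mapped (G : String → List String) (k : String) : ∀ (L : List String),
    (PySem.Dict.mk (L.map (fun s => (s, G s)))).get? k
    = if k ∈ L then some (G k) else none := by
  intro L
  induction L with
  | nil => simp [PySem.Dict.get?]
  | cons a t ih =>
    by_cases h : a = k
    · subst h; simp [PySem.Dict.get?]
    · simp [PySem.Dict.get?, h, Ne.symm h] at ih ⊢
      simpa [PySem.Dict.get?] using ih

-- modify on a dict of the mapped form keeps the form
theorem pv_modify_mapped (G : String → List String) (k : String) (f : List String → List String) :
    ∀ (L : List String), k ∈ L →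
    (PySem.Dict.mk (L.map (fun s => (s, G s)))).modify k [] f
    = PySem.Dict.mk (L.map (fun s => (s, if s = k then f (G k) else G s))) := by
  intro L hk
  have hget : (PySem.Dict.mk (L.map (fun s => (s, G s)))).getD k [] = G k := by
    simp [PySem.Dict.getD, pv_get?_mapped, hk]
  have hcont : (PySem.Dict.mk (L.map (fun s => (s, G s)))).contains k = true := by
    simp [PySem.Dict.contains, List.any_map, List.any_eq_true]
    exact hk
  simp only [PySem.Dict.modify, PySem.Dict.insert, hcont, if_true, hget]
  congr 1
  simp only [List.map_map]
  apply List.map_congr_left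
  intro s _
  by_cases h : s = k
  · subst h; simp
  · simp [Function.comp, h]

-- folding the per-page appends over the hits list keeps the mapped form
theorem pv_hitsfold_mapped (page : String) : ∀ (hs : List String) (L : List String)
    (G : String → List String), (∀ s ∈ hs, s ∈ L) →
    hs.foldl (fun d s => d.modify s [] (· ++ [page]))
      (PySem.Dict.mk (L.map (fun s => (s, G s))))
    = PySem.Dict.mk (L.map (fun s =>
        (s, G s ++ (hs.filter (fun h => h == s)).map (fun _ => page)))) := by
  intro hs
  induction hs with
  | nil => intro L G _; simp
  | cons h t ih =>
    intro L G hmem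
    have hh : h ∈ L := hmem h (by simp)
    rw [List.foldl_cons, pv_modify_mapped G h (· ++ [page]) L hh]
    rw [ih L _ (fun s hs => hmem s (by simp [hs]))]
    congr 1
    apply List.map_congr_left
    intro s _
    by_cases hsk : s = h
    · subst hsk; simp
    · simp [hsk, Ne.symm hsk]

-- pvGroup over an extended assignment list
theorem pv_group_append (assigns : List (String × List String)) (page : String)
    (hs : List String) (s : String) :
    pvGroup (assigns ++ [(page, hs)]) s
    = pvGroup assigns s ++ (hs.filter (fun h => h == s)).map (fun _ => page) := by
  simp [pvGroup]

-- A's (dict, last) state is the mapped image of B's (assigns, last) state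
def pvMapped (sections : List String) (assigns : List (String × List String)) :
    PySem.Dict String (List String) :=
  PySem.Dict.mk ((PySem.List.dedup sections).map (fun s => (s, pvGroup assigns s)))

theorem pv_step_last (sections : List String) (assigns : List (String × List String))
    (last page : String) (hlast : last ∈ sections) :
    (pvBStep sections (assigns, last) page).2 ∈ sections := by
  simp only [pvBStep]
  by_cases hempty : (sections.filter (fun s => PySem.Str.isIn s (pvNorm page))).isEmpty = true
  · rw [if_pos hempty]
    exact hlast
  · rw [if_neg hempty]
    have hne : sections.filter (fun s => PySem.Str.isIn s (pvNorm page)) ≠ [] := by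
      simpa [List.isEmpty_iff] using hempty
    have hmem : (sections.filter (fun s => PySem.Str.isIn s (pvNorm page))).getLastD last
        ∈ sections.filter (fun s => PySem.Str.isIn s (pvNorm page)) := by
      rw [List.getLastD_eq_getLast?, List.getLast?_eq_some_getLast hne, Option.getD_some]
      exact List.getLast_mem hne
    exact (List.mem_filter.mp hmem).1

theorem pv_step_dict (sections : List String) (assigns : List (String × List String))
    (last page : String) (hlast : last ∈ sections) :
    pvAStep sections (pvMapped sections assigns, last) page
    = (pvMapped sections ((pvBStep sections (assigns, last) page).1),
       (pvBStep sections (assigns, last) page).2) := by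
  have hmemL : ∀ s ∈ sections, s ∈ PySem.List.dedup sections := by
    intro s hs; simpa [PySem.List.mem_dedup] using hs
  simp only [pvAStep, pvBStep, pvMapped, pvNorm]
  rw [pv_inner_char]
  by_cases hempty : (sections.filter
      (fun s => PySem.Str.isIn s (PySem.Str.strip (PySem.Str.replace page "\n" "")))).isEmpty = true
  · have hnil := List.isEmpty_iff.mp hempty
    rw [hnil]
    simp only [List.foldl_nil, List.getLastD_nil, List.isEmpty_nil, Bool.not_true,
      Bool.or_false, if_true]
    rw [pv_modify_mapped (fun s => pvGroup assigns s) last (· ++ [page]) _ (hmemL last hlast)]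
    refine congrArg₂ Prod.mk ?_ rfl
    congr 1
    apply List.map_congr_left
    intro s _
    rw [pv_group_append]
    by_cases hs : s = last
    · subst hs; simp
    · have hne' : (last == s) = false := beq_eq_false_iff_ne.mpr (Ne.symm hs)
      simp [List.filter, hne', hs]
  · have hfalse : (sections.filter
        (fun s => PySem.Str.isIn s (PySem.Str.strip (PySem.Str.replace page "\n" "")))).isEmpty = false := by
      simpa using hempty
    simp only [hfalse, Bool.not_false, Bool.or_true, Bool.false_eq_true,
      if_true, if_false]
    rw [pv_hitsfold_mapped page _ _ _
      (fun s hs => hmemL s (List.mem_filter.mp hs).1)]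
    refine congrArg₂ Prod.mk ?_ rfl
    congr 1
    apply List.map_congr_left
    intro s _
    rw [pv_group_append]

theorem pv_main_inv (sections : List String) : ∀ (pages : List String)
    (assigns : List (String × List String)) (last : String), last ∈ sections →
    pages.foldl (pvAStep sections) (pvMapped sections assigns, last)
    = (pvMapped sections ((pages.foldl (pvBStep sections) (assigns, last)).1),
       (pages.foldl (pvBStep sections) (assigns, last)).2) := by
  intro pages
  induction pages with
  | nil => intro assigns last _; rfl
  | cons page rest ih =>
    intro assigns last hlast
    rw [List.foldl_cons, pv_step_dict sections assigns last page hlast, List.foldl_cons]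
    exact ih (pvBStep sections (assigns, last) page).1
      (pvBStep sections (assigns, last) page).2
      (pv_step_last sections assigns last page hlast)

-- building the initial dict: inserting [] for every section = the mapped dict over the growing key set
theorem pv_init_dict : ∀ (sections : List String) (L0 : List String),
    sections.foldl (fun d s => d.insert s ([] : List String))
      (PySem.Dict.mk (L0.map (fun s => (s, ([] : List String)))))
    = PySem.Dict.mk ((sections.foldl PySem.Set.add L0).map (fun s => (s, []))) := by
  intro sections
  induction sections with
  | nil => intro L0; rfl
  | cons a t ih =>
    intro L0
    rw [List.foldl_cons, List.foldl_cons]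
    have hins : (PySem.Dict.mk (L0.map (fun s => (s, ([] : List String))))).insert a []
        = PySem.Dict.mk ((PySem.Set.add L0 a).map (fun s => (s, []))) := by
      by_cases hmem : a ∈ L0
      · have hcont : (PySem.Dict.mk (L0.map (fun s => (s, ([] : List String))))).contains a = true := by
          simp [PySem.Dict.contains, List.any_map, List.any_eq_true]
          exact hmem
        simp only [PySem.Dict.insert, hcont, if_true, PySem.Set.add]
        have hc : PySem.Set.contains L0 a = true := by
          simp [PySem.Set.contains, hmem]
        rw [hc]
        simp only [if_true]
        congr 1
        simp only [List.map_map]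
        apply List.map_congr_left
        intro s _
        by_cases hs : s = a
        · subst hs; simp
        · simp [Function.comp, hs]
      · have hcont : (PySem.Dict.mk (L0.map (fun s => (s, ([] : List String))))).contains a = false := by
          simp [PySem.Dict.contains, List.any_map]
          exact fun x hx hxa => hmem (hxa ▸ hx)
        simp only [PySem.Dict.insert, hcont, Bool.false_eq_true, if_false, PySem.Set.add]
        have hc : PySem.Set.contains L0 a = false := by
          simp [PySem.Set.contains, hmem]
        rw [hc]
        simp
    rw [hins, ih]

-- ===== VERDICT (by name: the statement is the Claim_ definition above) =====
theorem split_by_section_spec : Claim_equal_split_by_section := by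
  unfold Claim_equal_split_by_section
  intro pages sections _ hpre
  unfold Spec_split_by_section split_by_section split_by_section_alt
  have h0 : sections.foldl (fun d s => d.insert s ([] : List String)) PySem.Dict.empty
      = pvMapped sections [] := by
    have h := pv_init_dict sections []
    simpa [pvMapped, pvGroup, PySem.List.dedup, PySem.Set.ofList, PySem.Set.empty,
      PySem.Dict.empty] using h
  have hhead : sections.headD "" ∈ sections := by
    cases sections with
    | nil => exact absurd rfl hpre
    | cons a t => simp
  show (pages.foldl (pvAStep sections)
      (sections.foldl (fun d s => d.insert s ([] : List String)) PySem.Dict.empty,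
       sections.headD "")).1.items
    = (PySem.List.dedup sections).map
        (fun s => (s, pvGroup ((pages.foldl (pvBStep sections) ([], sections.headD "")).1) s))
  rw [h0, pv_main_inv sections pages [] (sections.headD "") hhead]
  rfl
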